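-- pv_equiv track=rewrite | github.com/zero-day-ai/gibson-framework | gibson/utils/schema_diff.py | should_bump_major
-- ===== SOURCE A (Python) =====
-- from typing import Dict, Any, List, Set, Tuple, Optional
--
-- def should_bump_major(changes: List[str]) -> bool:
--     """Determine if changes require a major version bump.
--
--     Args:
--         changes: List of change descriptions
--
--     Returns:
--         True if major version bump is required
--     """
--     breaking_indicators = [
--         "removed required field",
--         "changed type",
--         "removed enum value",
--         "removed property",
--     ]
--
--     for change in changes:
--         if any(indicator in change.lower() for indicator in breaking_indicators):
--             return True
--
--     return False
-- ===== SOURCE B (Python) =====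
-- # Breaking-change detection via a first-character dispatch table: scan each
-- # lowercased change once, and at each position only try the indicators whose
-- # first character matches, checking them with startswith at that offset.
--
-- _INDICATORS = [
--     "removed required field",
--     "changed type",
--     "removed enum value",
--     "removed property",
-- ]
--
-- _BY_FIRST = {}
-- for _s in _INDICATORS:
--     _BY_FIRST.setdefault(_s[0], []).append(_s)
--
--
-- def should_bump_major(changes):
--     """Determine if changes require a major version bump.
--
--     Args:
--         changes: List of change descriptions
--
--     Returns:
--         True if major version bump is required
--     """
--     for change in changes:
--         text = change.lower()
--         for i, ch in enumerate(text):
--             for cand in _BY_FIRST.get(ch, ()):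
--                 if text.startswith(cand, i):
--                     return True
--     return False
-- ===== Notes on version B (the rewrite author's own statement) =====
-- stated objective: alternative
-- what changed: B replaces A's per-change loop of four independent substring scans (`indicator in change.lower()`) with a single explicit position scan over each lowercased change that consults a dispatch table keyed by first character and only tries startswith for the indicators whose first character matches at that position.
import Mathlib
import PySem

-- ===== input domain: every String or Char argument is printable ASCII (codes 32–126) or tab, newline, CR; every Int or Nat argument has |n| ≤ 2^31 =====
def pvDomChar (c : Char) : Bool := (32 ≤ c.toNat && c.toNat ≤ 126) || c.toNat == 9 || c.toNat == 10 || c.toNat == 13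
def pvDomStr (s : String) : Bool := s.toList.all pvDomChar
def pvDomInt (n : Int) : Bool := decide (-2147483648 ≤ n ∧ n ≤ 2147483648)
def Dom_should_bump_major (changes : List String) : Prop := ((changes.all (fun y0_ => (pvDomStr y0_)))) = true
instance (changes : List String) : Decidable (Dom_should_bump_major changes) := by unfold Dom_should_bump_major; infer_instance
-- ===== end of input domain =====

-- B detects the indicators with a first-character dispatch table and an explicit
-- position scan (startswith at each offset), instead of A's four substring scans.

-- ===== PORT A =====
-- the literal `breaking_indicators` list A defines
def breakingIndicators : List String :=
  ["removed required field", "changed type", "removed enum value", "removed property"]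

-- A: for change in changes: if any(indicator in change.lower() for indicator in breaking_indicators): return True; return False
def should_bump_major (changes : List String) : Bool :=
  changes.any (fun change =>
    breakingIndicators.any (fun indicator => PySem.Str.isIn indicator (PySem.Str.lower change)))

-- ===== PORT B =====
-- _BY_FIRST: the module-level dispatch dict {'r': [...], 'c': [...]} built from _INDICATORS
def altByFirst (ch : Char) : List (List Char) :=
  if ch = 'r' then
    ["removed required field".toList, "removed enum value".toList, "removed property".toList]
  else if ch = 'c' then
    ["changed type".toList]
  else []

-- inner `for i, ch in enumerate(text): for cand in ...: if text.startswith(cand, i)`,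
-- as a scan over the suffixes of text (text.startswith(cand, i) = cand prefixes text[i:])
def altScan : List Char → Bool
  | [] => false
  | ch :: rest =>
      (altByFirst ch).any (fun cand => cand.isPrefixOf (ch :: rest)) || altScan rest

-- outer `for change in changes: ... return True` / `return False`
def should_bump_major_alt : List String → Bool
  | [] => false
  | change :: rest =>
      if altScan (PySem.Str.lower change).toList then true
      else should_bump_major_alt rest

-- ===== PRECONDITION & SPEC =====
def Spec_should_bump_major (changes : List String) (out : Bool) : Prop := out = should_bump_major_alt changes
instance (changes : List String) (out : Bool) : Decidable (Spec_should_bump_major changes out) := by unfold Spec_should_bump_major; infer_instance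

-- ===== CLAIM =====
def Claim_equal_should_bump_major : Prop := ∀ (changes : List String), Dom_should_bump_major changes → Spec_should_bump_major changes (should_bump_major changes)

-- ===== LEMMAS AND PROOFS =====

-- at one position, the dispatch table tries exactly the indicators that could match there
lemma dispatch_eq (ch : Char) (rest : List Char) :
    (altByFirst ch).any (fun cand => cand.isPrefixOf (ch :: rest)) =
      (breakingIndicators.map String.toList).any (fun p => p.isPrefixOf (ch :: rest)) := by
  unfold altByFirst breakingIndicators
  by_cases h1 : ch = 'r'
  · subst h1; simp [List.isPrefixOf]
  · by_cases h2 : ch = 'c'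
    · subst h2; simp [List.isPrefixOf]
    · simp [h1, h2, List.isPrefixOf, Bool.beq_eq_decide_eq,
        show ('r' = ch) = False from by simp [eq_comm, h1],
        show ('c' = ch) = False from by simp [eq_comm, h2]]

-- the position scan finds an indicator iff some indicator is a substring
lemma altScan_eq_isIn : ∀ t : List Char,
    altScan t = breakingIndicators.any (fun ind => PySem.Chars.isIn ind.toList t)
  | [] => by decide
  | ch :: rest => by
    rw [altScan, dispatch_eq, altScan_eq_isIn rest, Bool.eq_iff_iff]
    simp only [Bool.or_eq_true, List.any_eq_true, List.mem_map, PySem.Chars.isIn_iff_infix,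
      List.infix_cons_iff, List.isPrefixOf_iff_prefix]
    constructor
    · rintro (⟨p, ⟨ind, hmem, rfl⟩, hp⟩ | ⟨ind, hmem, hinf⟩)
      · exact ⟨ind, hmem, Or.inl hp⟩
      · exact ⟨ind, hmem, Or.inr hinf⟩
    · rintro ⟨ind, hmem, hp | hinf⟩
      · exact Or.inl ⟨ind.toList, ⟨ind, hmem, rfl⟩, hp⟩
      · exact Or.inr ⟨ind, hmem, hinf⟩

-- B's outer early-return loop equals A's `any` over changes
lemma alt_eq_any : ∀ changes : List String,
    should_bump_major_alt changes
      = changes.any (fun c => altScan (PySem.Str.lower c).toList)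
  | [] => rfl
  | c :: rest => by
    rw [should_bump_major_alt, alt_eq_any rest, List.any_cons]
    cases altScan (PySem.Str.lower c).toList <;> simp

-- ===== VERDICT =====
theorem should_bump_major_spec : Claim_equal_should_bump_major := by
  intro changes _
  unfold Spec_should_bump_major should_bump_major
  rw [alt_eq_any]
  refine congrArg _ (funext fun c => ?_)
  rw [altScan_eq_isIn]
  refine congrArg _ (funext fun ind => ?_)
  rw [Bool.eq_iff_iff, PySem.Str.isIn_iff_infix, PySem.Chars.isIn_iff_infix]
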